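-- pv_equiv track=rewrite | github.com/jero98772/toma_nota | clases/estructuras_de_datos_y_algoritmos/tareas/recursion/cambiarx.py | xs
-- ===== SOURCE A (Python) =====
-- def xs(txt,i,size,newtxt,chararcter="x"):
--     if i<size:
--         if txt[i]==chararcter:
--             return xs(txt,i+1,size,newtxt+"y",chararcter)
--         else:
--             return xs(txt,i+1,size,newtxt+txt[i],chararcter)
--     else:
--         return newtxt
-- ===== SOURCE B (Python) =====
-- def xs(txt, i, size, newtxt, chararcter="x"):
--     out = newtxt
--     while i < size:
--         c = txt[i]
--         out += "y" if c == chararcter else c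
--         i += 1
--     return out
-- ===== Notes on version B (the rewrite author's own statement) =====
-- stated objective: simpler
-- what changed: Replaced the recursion (one call frame per character, string rebuilt through the frames) with a plain iterative while-loop accumulating the result; element-by-element indexing keeps exception behaviour identical.
import Mathlib
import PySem

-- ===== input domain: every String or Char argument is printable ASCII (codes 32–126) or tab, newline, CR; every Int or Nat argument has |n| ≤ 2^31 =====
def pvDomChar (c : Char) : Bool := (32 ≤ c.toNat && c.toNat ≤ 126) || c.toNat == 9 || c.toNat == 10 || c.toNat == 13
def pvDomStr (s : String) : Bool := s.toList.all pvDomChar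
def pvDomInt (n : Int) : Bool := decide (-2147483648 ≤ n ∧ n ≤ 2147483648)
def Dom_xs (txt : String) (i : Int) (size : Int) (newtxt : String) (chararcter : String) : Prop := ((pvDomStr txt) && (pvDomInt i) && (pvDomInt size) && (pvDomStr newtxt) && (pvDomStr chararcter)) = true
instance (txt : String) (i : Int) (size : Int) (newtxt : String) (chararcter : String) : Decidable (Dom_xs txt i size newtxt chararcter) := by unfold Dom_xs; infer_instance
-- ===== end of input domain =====

-- B replaces A's recursion by an explicit iterative loop over the index range (simpler decomposition, same behaviour).

-- ===== PORT A =====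
-- literal port of the recursion; txt[i] is PySem.Str.pyGet? (none = IndexError, excluded by Pre_)
def xs (txt : String) (i : Int) (size : Int) (newtxt : String) (chararcter : String) : String :=
  if _h : i < size then
    match PySem.Str.pyGet? txt i with
    | some c =>
      if String.singleton c == chararcter then
        xs txt (i + 1) size (newtxt ++ "y") chararcter
      else
        xs txt (i + 1) size (newtxt ++ String.singleton c) chararcter
    | none => newtxt   -- Python raises IndexError here; outside Pre_
  else
    newtxt
termination_by (size - i).toNat
decreasing_by all_goals omega

-- ===== PORT B =====
-- the while-loop over indices i, i+1, …, size-1 with accumulator out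
def xs_alt (txt : String) (i : Int) (size : Int) (newtxt : String) (chararcter : String) : String :=
  (PySem.List.pyRange i size 1).foldl
    (fun out j =>
      match PySem.Str.pyGet? txt j with
      | some c => out ++ (if String.singleton c == chararcter then "y" else String.singleton c)
      | none => out)   -- Python raises IndexError here; outside Pre_
    newtxt

-- ===== PRECONDITION & SPEC =====
-- Pre_ excludes exactly the inputs where A (and B alike) raises IndexError: some visited index j ∈ [i, size) out of range.
def Pre_xs (txt : String) (i : Int) (size : Int) (newtxt : String) (chararcter : String) : Prop :=
  i < size → (-(txt.toList.length : Int) ≤ i ∧ size ≤ (txt.toList.length : Int))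
instance (txt : String) (i : Int) (size : Int) (newtxt : String) (chararcter : String) : Decidable (Pre_xs txt i size newtxt chararcter) := by unfold Pre_xs; infer_instance

def pvWitness_xs : String × Int × Int × String × String := ("xaxb", 0, 4, "", "x")

def Spec_xs (txt : String) (i : Int) (size : Int) (newtxt : String) (chararcter : String) (out : String) : Prop := out = xs_alt txt i size newtxt chararcter
instance (txt : String) (i : Int) (size : Int) (newtxt : String) (chararcter : String) (out : String) : Decidable (Spec_xs txt i size newtxt chararcter out) := by unfold Spec_xs; infer_instance

-- ===== CLAIM =====
def Claim_equal_xs : Prop := ∀ (txt : String) (i : Int) (size : Int) (newtxt : String) (chararcter : String), Dom_xs txt i size newtxt chararcter → Pre_xs txt i size newtxt chararcter → Spec_xs txt i size newtxt chararcter (xs txt i size newtxt chararcter)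

-- ===== LEMMAS AND PROOFS =====

theorem xs_alt_nil (txt : String) (i size : Int) (newtxt chararcter : String)
    (h : size ≤ i) : xs_alt txt i size newtxt chararcter = newtxt := by
  unfold xs_alt
  rw [PySem.List.pyRange_one_eq_nil h]
  rfl

theorem xs_alt_cons (txt : String) (i size : Int) (newtxt chararcter : String)
    (h : i < size) :
    xs_alt txt i size newtxt chararcter =
      xs_alt txt (i + 1) size
        (match PySem.Str.pyGet? txt i with
         | some c => newtxt ++ (if String.singleton c == chararcter then "y" else String.singleton c)
         | none => newtxt)
        chararcter := by
  unfold xs_alt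
  rw [PySem.List.pyRange_one_cons h]
  cases hc : PySem.List.pyGet? txt.toList i <;> simp [List.foldl, hc]

theorem xs_eq_alt (txt : String) (i size : Int) (newtxt chararcter : String)
    (hpre : i < size → (-(txt.toList.length : Int) ≤ i ∧ size ≤ (txt.toList.length : Int))) :
    xs txt i size newtxt chararcter = xs_alt txt i size newtxt chararcter := by
  rw [xs]
  by_cases h : i < size
  · obtain ⟨h1, h2⟩ := hpre h
    have hsome : ∃ c, PySem.Str.pyGet? txt i = some c := by
      rcases hc : PySem.Str.pyGet? txt i with _ | c
      · exfalso
        have := (PySem.List.pyGet?_eq_none_iff (xs := txt.toList) (i := i)).mp (by simpa using hc)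
        exact this ⟨h1, by omega⟩
      · exact ⟨c, rfl⟩
    obtain ⟨c, hc⟩ := hsome
    rw [xs_alt_cons txt i size newtxt chararcter h]
    simp only [h, dif_pos, hc]
    have hrec : ∀ nt, xs txt (i + 1) size nt chararcter = xs_alt txt (i + 1) size nt chararcter := by
      intro nt
      exact xs_eq_alt txt (i + 1) size nt chararcter (fun h' => ⟨by omega, h2⟩)
    by_cases hch : String.singleton c == chararcter
    · simp only [hch, if_pos]
      exact hrec _
    · simp only [hch, if_neg, Bool.false_eq_true, not_false_eq_true]
      exact hrec _
  · simp only [h, dif_neg, not_false_eq_true]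
    rw [xs_alt_nil txt i size newtxt chararcter (by omega)]
termination_by (size - i).toNat
decreasing_by all_goals omega

-- ===== VERDICT =====
theorem xs_spec : Claim_equal_xs := by
  intro txt i size newtxt chararcter _hdom hpre
  exact xs_eq_alt txt i size newtxt chararcter hpre
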